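-- pv_equiv track=rewrite | github.com/JakeMittleman/Othello | ai.py | ai_find_best_move
-- ===== SOURCE A (Python) =====
-- def ai_find_best_move(legal_moves):
--     """
--         name: ai_find_best_move
--         parameters: legal_moves -- a dictionary (the list of legal
--                                     moves from the board class)
--         returns: a tuple -- the best move from legal_moves
--                             (if no legal moves, returns an empty tuple)
--         does: chooses the move that will flip the most tiles. Iterates
--             through the dictionary values to find the longest list
--             and returns the key of that value
--     """
--
--     # if there is at least 1 legal move
--     if len(legal_moves) > 0:
--
--         # get a list of keys and values
--         boxes = list(legal_moves.keys())
--         flippable_tiles = list(legal_moves.values())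
--
--         # initialize the max to the first option
--         best_move = flippable_tiles[0]
--
--         # find the max
--         for option in flippable_tiles[1:]:
--             if len(option) > len(best_move):
--                 best_move = option
--
--         # assign chosen_move
--         move_index = flippable_tiles.index(best_move)
--         chosen_move = boxes[move_index]
--
--         return chosen_move
--
--     # if no legal moves, return an empty tuple
--     else:
--         return ()
-- ===== SOURCE B (Python) =====
-- def ai_find_best_move(legal_moves):
--     # Sort-then-pick: stably sort the items by descending value-list length
--     # and return the first key. Stability of sorted() means that among ties
--     # the earliest-inserted key comes first, matching A's strict-> max scan.
--     # Returns () for an empty dict, like A.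
--     if not legal_moves:
--         return ()
--     ranked = sorted(legal_moves.items(), key=lambda kv: -len(kv[1]))
--     return ranked[0][0]
-- ===== Notes on version B (the rewrite author's own statement) =====
-- stated objective: alternative
-- what changed: B stably sorts the items by descending value-list length and returns the first key of the sorted order, replacing A's linear max-scan over value lists followed by a .index rescan and a keys-list lookup; sort stability resolves ties to the first key exactly as A's strict > does.
-- outside the precondition, e.g. on ai_find_best_move({}): A returns (), B returns ()
import Mathlib
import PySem

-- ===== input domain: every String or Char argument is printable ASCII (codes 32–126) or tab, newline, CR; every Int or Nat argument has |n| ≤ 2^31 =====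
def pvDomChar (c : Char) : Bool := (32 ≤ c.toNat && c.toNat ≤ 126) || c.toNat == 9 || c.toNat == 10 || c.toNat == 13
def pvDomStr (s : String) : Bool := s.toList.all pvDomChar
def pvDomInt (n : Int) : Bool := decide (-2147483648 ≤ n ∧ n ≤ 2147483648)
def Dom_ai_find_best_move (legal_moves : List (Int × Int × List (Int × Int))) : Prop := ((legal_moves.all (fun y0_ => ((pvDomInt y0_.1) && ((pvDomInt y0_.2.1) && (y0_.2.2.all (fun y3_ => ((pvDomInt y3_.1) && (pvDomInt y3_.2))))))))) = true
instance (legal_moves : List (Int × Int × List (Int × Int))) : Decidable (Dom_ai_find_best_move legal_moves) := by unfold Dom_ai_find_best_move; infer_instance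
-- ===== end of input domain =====

-- B replaces A's value-list max-scan + .index rescan + keys lookup by a stable
-- sort of the items on descending value-list length, returning the first key;
-- objective: alternative (sort-then-pick instead of scan-then-rescan).

-- ===== PORT A =====
-- Literal port of A: build boxes/values lists, scan values[1:] for the longest
-- list with strict >, then recover the key via values.index(best_move).
def ai_find_best_move (legal_moves : List (Int × Int × List (Int × Int))) : Int × Int :=
  if legal_moves.length > 0 then
    let boxes := legal_moves.map (fun p => (p.1, p.2.1))
    let flippable_tiles := legal_moves.map (fun p => p.2.2)
    let best_move0 := flippable_tiles.headD []     -- flippable_tiles[0]; nonempty under the guard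
    let best_move := (PySem.List.slice flippable_tiles (some 1) none).foldl
        (fun b o => if o.length > b.length then o else b) best_move0
    let move_index := (PySem.List.index? flippable_tiles best_move).getD 0   -- always found: best_move ∈ flippable_tiles
    (PySem.List.pyGet? boxes (move_index : Int)).getD (0, 0)                 -- always in range
  else (0, 0)   -- Python returns () here: excluded by Pre_

-- ===== PORT B =====
-- Port of B: stable sort of the items by key kv ↦ -len(kv[1]), first key.
def ai_find_best_move_alt (legal_moves : List (Int × Int × List (Int × Int))) : Int × Int :=
  if legal_moves.isEmpty then (0, 0)   -- Python returns () here: excluded by Pre_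
  else
    let ranked := PySem.List.sorted legal_moves (fun kv => -(kv.2.2.length : Int)) false
    let first := (PySem.List.pyGet? ranked (0 : Int)).getD (0, 0, [])   -- ranked[0]; nonempty here
    (first.1, first.2.1)

-- ===== PRECONDITION & SPEC =====
-- Pre_ excludes the empty dict, on which A (and B) return the empty tuple (),
-- which is not a value of the declared return type tuple[int,int].
def Pre_ai_find_best_move (legal_moves : List (Int × Int × List (Int × Int))) : Prop :=
  legal_moves ≠ []
instance (legal_moves : List (Int × Int × List (Int × Int))) : Decidable (Pre_ai_find_best_move legal_moves) := by unfold Pre_ai_find_best_move; infer_instance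

def pvWitness_ai_find_best_move : (List (Int × Int × List (Int × Int))) := [(1, 2, [(0, 0), (1, 1)]), (3, 4, [(2, 2)])]

def Spec_ai_find_best_move (legal_moves : List (Int × Int × List (Int × Int))) (out : Int × Int) : Prop := out = ai_find_best_move_alt legal_moves
instance (legal_moves : List (Int × Int × List (Int × Int))) (out : Int × Int) : Decidable (Spec_ai_find_best_move legal_moves out) := by unfold Spec_ai_find_best_move; infer_instance

-- ===== CLAIM (what is proved, stated in full; the proofs are below) =====
def Claim_equal_ai_find_best_move : Prop := ∀ (legal_moves : List (Int × Int × List (Int × Int))), Dom_ai_find_best_move legal_moves → Pre_ai_find_best_move legal_moves → Spec_ai_find_best_move legal_moves (ai_find_best_move legal_moves)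

-- ===== LEMMAS AND PROOFS =====

-- A-side fold over the value lists of `t` starting from accumulator `v`.
def pvAfold (v : List (Int × Int)) (t : List (Int × Int × List (Int × Int))) : List (Int × Int) :=
  t.foldl (fun b q => if q.2.2.length > b.length then q.2.2 else b) v

-- Reference fold over whole items tracking the first longest item.
def pvBfold (a : Int × Int × List (Int × Int)) (t : List (Int × Int × List (Int × Int))) :
    Int × Int × List (Int × Int) :=
  t.foldl (fun b q => if q.2.2.length > b.2.2.length then q else b) a

-- head of insertBy: the new element lands in front iff it beats the old head.
theorem pv_headD_insertBy {α : Type} (before : α → α → Bool) (x : α) (ys : List α) (d : α) :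
    (PySem.List.insertBy before x ys).headD d =
      (match ys with | [] => x | y :: _ => if before x y then x else y) := by
  cases ys with
  | nil => rfl
  | cons y ys =>
    show (if before x y then x :: y :: ys else y :: PySem.List.insertBy before x ys).headD d = _
    cases h : before x y <;> simp [h]

theorem pv_insertBy_ne_nil {α : Type} (before : α → α → Bool) (x : α) (ys : List α) :
    PySem.List.insertBy before x ys ≠ [] := by
  cases ys with
  | nil => simp [PySem.List.insertBy]
  | cons y ys =>
    show (if before x y then x :: y :: ys else y :: PySem.List.insertBy before x ys) ≠ []
    split <;> simp

-- head of the insertion fold = the scan keeping the earliest "before"-minimal element.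
theorem pv_fold_head {α : Type} (before : α → α → Bool) (xs : List α) :
    ∀ (acc : List α) (d : α), acc ≠ [] →
      ((xs.foldl (fun ac x => PySem.List.insertBy before x ac) acc).headD d =
        xs.foldl (fun b q => if before q b then q else b) (acc.headD d)) ∧
      (xs.foldl (fun ac x => PySem.List.insertBy before x ac) acc) ≠ [] := by
  induction xs with
  | nil => intro acc d hne; exact ⟨rfl, hne⟩
  | cons x xs ih =>
    intro acc d hne
    cases acc with
    | nil => exact absurd rfl hne
    | cons h t =>
      have hstep : (PySem.List.insertBy before x (h :: t)).headD d =
          (if before x h then x else h) := by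
        rw [pv_headD_insertBy]
      have := ih (PySem.List.insertBy before x (h :: t)) d
        (pv_insertBy_ne_nil before x (h :: t))
      rw [hstep] at this
      simpa using this

-- Core invariant for A: A's best list sits in the value list at a position whose
-- key is the key of the first longest item; moreover the best list is the
-- initial one or strictly longer than it.
theorem pv_main (t : List (Int × Int × List (Int × Int))) :
    ∀ (p : Int × Int × List (Int × Int)),
    ∃ i : Nat,
      PySem.List.index? (p.2.2 :: t.map (fun q => q.2.2)) (pvAfold p.2.2 t) = some i ∧
      (((p.1, p.2.1) :: t.map (fun q => (q.1, q.2.1)))[i]? =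
        some ((pvBfold p t).1, (pvBfold p t).2.1)) ∧
      (pvAfold p.2.2 t = p.2.2 ∨ p.2.2.length < (pvAfold p.2.2 t).length) := by
  induction t with
  | nil =>
    intro p
    refine ⟨0, ?_, ?_, Or.inl rfl⟩
    · simp [pvAfold]
    · simp [pvBfold]
  | cons q t' ih =>
    intro p
    by_cases h : q.2.2.length > p.2.2.length
    · -- accumulator replaced by q
      obtain ⟨i, h1, h2, h3⟩ := ih q
      have hA : pvAfold p.2.2 (q :: t') = pvAfold q.2.2 t' := by simp [pvAfold, h]
      have hB : pvBfold p (q :: t') = pvBfold q t' := by simp [pvBfold, h]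
      have hlen : p.2.2.length < (pvAfold q.2.2 t').length := by
        rcases h3 with h3 | h3
        · rw [h3]; omega
        · omega
      have hne : p.2.2 ≠ pvAfold q.2.2 t' := fun he => by rw [← he] at hlen; omega
      refine ⟨i + 1, ?_, ?_, ?_⟩
      · rw [hA, show (q :: t').map (fun q => q.2.2) = q.2.2 :: t'.map (fun q => q.2.2) from rfl,
          PySem.List.index?_cons_of_ne _ hne, h1]
        rfl
      · rw [hB]
        simpa using h2
      · rw [hA]; exact Or.inr hlen
    · -- accumulator kept
      obtain ⟨i, h1, h2, h3⟩ := ih p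
      have hA : pvAfold p.2.2 (q :: t') = pvAfold p.2.2 t' := by simp [pvAfold, h]
      have hB : pvBfold p (q :: t') = pvBfold p t' := by simp [pvBfold, h]
      rcases h3 with hv | hlen
      · -- best = p.2.2 : found at position 0 in both lists
        have hi0 : i = 0 := by
          rw [hv, PySem.List.index?_cons_self] at h1
          exact (Option.some_injective _ h1.symm)
        refine ⟨0, ?_, ?_, ?_⟩
        · rw [hA, hv]
          exact PySem.List.index?_cons_self p.2.2 _
        · rw [hB]
          have := h2
          rw [hi0] at this
          simpa using this
        · rw [hA]; exact Or.inl hv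
      · -- best strictly longer than p.2.2: p's and q's value lists are distinct from it
        have hnev : p.2.2 ≠ pvAfold p.2.2 t' := fun he => by rw [← he] at hlen; omega
        have hneq : q.2.2 ≠ pvAfold p.2.2 t' := fun he => by
          have : q.2.2.length ≤ p.2.2.length := by omega
          rw [he] at this; omega
        rw [PySem.List.index?_cons_of_ne _ hnev] at h1
        obtain ⟨i', hi', hii⟩ := Option.map_eq_some_iff.mp h1
        refine ⟨i' + 2, ?_, ?_, ?_⟩
        · rw [hA, show (q :: t').map (fun q => q.2.2) = q.2.2 :: t'.map (fun q => q.2.2) from rfl,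
            PySem.List.index?_cons_of_ne _ hnev, PySem.List.index?_cons_of_ne _ hneq, hi']
          rfl
        · rw [hB]
          have := h2
          rw [← hii] at this
          simpa using this
        · rw [hA]; exact Or.inr hlen

-- B's sorted head is the reference fold pvBfold.
theorem pv_alt_eq_fold (p : Int × Int × List (Int × Int))
    (rest : List (Int × Int × List (Int × Int))) :
    ai_find_best_move_alt (p :: rest) = ((pvBfold p rest).1, (pvBfold p rest).2.1) := by
  unfold ai_find_best_move_alt
  simp only [List.isEmpty_cons, if_neg Bool.false_ne_true]
  have hsorted : PySem.List.sorted (p :: rest) (fun kv => -(kv.2.2.length : Int)) false =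
      rest.foldl (fun ac x => PySem.List.insertBy
        (fun a b => decide (-(a.2.2.length : Int) < -(b.2.2.length : Int))) x ac) [p] := by
    rfl
  obtain ⟨hhead, hne⟩ := pv_fold_head
    (fun a b => decide (-(a.2.2.length : Int) < -(b.2.2.length : Int))) rest
    [p] (0, 0, ([] : List (Int × Int))) (by simp)
  have hfold : rest.foldl (fun b q =>
        if b.2.2.length < q.2.2.length then q else b) p
      = pvBfold p rest := rfl
  rw [hsorted]
  cases hs : rest.foldl (fun ac x => PySem.List.insertBy
      (fun a b => decide (-(a.2.2.length : Int) < -(b.2.2.length : Int))) x ac) [p] with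
  | nil => exact absurd hs hne
  | cons r rs =>
    rw [hs] at hhead
    simp at hhead
    simp [PySem.List.pyGet?, PySem.List.pyIdx?, hhead, hfold]

-- ===== VERDICT (by name: the statement is the Claim_ definition above) =====
theorem ai_find_best_move_spec : Claim_equal_ai_find_best_move := by
  intro lm _ hpre
  match lm with
  | [] => exact absurd rfl hpre
  | p :: rest =>
    obtain ⟨i, h1, h2, _⟩ := pv_main rest p
    show ai_find_best_move (p :: rest) = ai_find_best_move_alt (p :: rest)
    rw [pv_alt_eq_fold]
    unfold ai_find_best_move
    simp only [List.length_cons, List.map_cons, List.headD_cons,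
      PySem.List.slice_from_one, List.tail_cons, gt_iff_lt, if_pos (Nat.succ_pos rest.length)]
    rw [List.foldl_map]
    have hfold : rest.foldl (fun b q => if q.2.2.length > b.length then q.2.2 else b) p.2.2
        = pvAfold p.2.2 rest := rfl
    rw [hfold, h1]
    simp only [Option.getD_some, PySem.List.pyGet?_natCast]
    rw [show ((p.1, p.2.1) :: rest.map (fun q => (q.1, q.2.1)))[i]? = _ from h2]
    rfl
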